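-- pv_equiv track=rewrite | github.com/martinhova01/knowit_kodekalender | 24/01/main.py | place_blanket
-- ===== SOURCE A (Python) =====
-- def place_blanket(start_x, start_y, blanket: set, joe: dict) -> int:
--     s = 0
--     for (x, y) in blanket:
--         nx, ny = start_x + x, start_y + y
--         if (nx, ny) not in joe.keys():
--             continue
--         s += joe[(nx, ny)]
--     return s
-- ===== SOURCE B (Python) =====
-- def place_blanket(start_x, start_y, blanket: set, joe: dict) -> int:
--     shifted = {(start_x + x, start_y + y) for (x, y) in blanket}
--     return sum(v for k, v in joe.items() if k in shifted)
-- ===== Notes on version B (the rewrite author's own statement) =====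
-- stated objective: alternative
-- what changed: B precomputes the set of shifted blanket points in one pass, then sums joe's values whose key lies in that set (a filtered sum over joe), instead of A's single loop over blanket with a dict lookup per point; Pre_ only states the Nodup facts Python's set/dict types already guarantee.
import Mathlib
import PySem

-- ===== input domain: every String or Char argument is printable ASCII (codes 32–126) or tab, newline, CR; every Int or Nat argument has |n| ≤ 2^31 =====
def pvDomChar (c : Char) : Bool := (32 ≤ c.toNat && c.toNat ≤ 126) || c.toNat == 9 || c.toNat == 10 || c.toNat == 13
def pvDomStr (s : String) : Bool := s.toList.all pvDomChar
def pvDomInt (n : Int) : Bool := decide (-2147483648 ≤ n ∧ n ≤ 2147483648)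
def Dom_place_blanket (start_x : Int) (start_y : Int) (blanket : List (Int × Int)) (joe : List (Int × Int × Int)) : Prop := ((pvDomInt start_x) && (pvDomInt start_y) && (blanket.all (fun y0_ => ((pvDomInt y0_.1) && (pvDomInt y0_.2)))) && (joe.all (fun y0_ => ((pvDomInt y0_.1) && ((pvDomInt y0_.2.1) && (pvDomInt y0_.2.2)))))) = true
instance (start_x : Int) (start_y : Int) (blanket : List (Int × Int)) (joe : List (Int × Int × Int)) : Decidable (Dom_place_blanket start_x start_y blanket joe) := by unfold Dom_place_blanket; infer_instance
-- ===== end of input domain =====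

-- B stages the computation: build the set of shifted blanket points, then sum joe values whose key is in it (same cost class as A; 'alternative').
-- ===== PORT A =====
-- A: for each blanket point, shift by (start_x,start_y) and, if present in joe, add its value.
-- dict lookup "(nx,ny) in joe.keys() / joe[(nx,ny)]" = first entry with that key in the assoc list.
def place_blanket (start_x : Int) (start_y : Int) (blanket : List (Int × Int)) (joe : List (Int × Int × Int)) : Int :=
  blanket.foldl (fun s p =>
    match joe.find? (fun t => t.1 == start_x + p.1 && t.2.1 == start_y + p.2) with
    | some t => s + t.2.2
    | none => s) 0

-- ===== PORT B =====
-- B: stage 1 builds the set comprehension {(start_x+x, start_y+y) …}; stage 2 is sum(v for k, v in joe.items() if k in shifted).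
def place_blanket_alt (start_x : Int) (start_y : Int) (blanket : List (Int × Int)) (joe : List (Int × Int × Int)) : Int :=
  let shifted : PySem.Set (Int × Int) :=
    PySem.Set.ofList (blanket.map (fun p => (start_x + p.1, start_y + p.2)))
  ((joe.filter (fun t => PySem.Set.contains shifted (t.1, t.2.1))).map (fun t => t.2.2)).sum

-- ===== PRECONDITION & SPEC =====
-- Pre_ excludes lists with duplicate blanket points or duplicate joe keys: blanket is a Python set
-- and joe a dict, so such lists do not arise from real inputs, and on them A's first-match lookup
-- and B's sum over entries are both accidental.
def Pre_place_blanket (start_x : Int) (start_y : Int) (blanket : List (Int × Int)) (joe : List (Int × Int × Int)) : Prop :=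
  blanket.Nodup ∧ (joe.map (fun t => (t.1, t.2.1))).Nodup
instance (start_x : Int) (start_y : Int) (blanket : List (Int × Int)) (joe : List (Int × Int × Int)) : Decidable (Pre_place_blanket start_x start_y blanket joe) := by unfold Pre_place_blanket; infer_instance
def pvWitness_place_blanket : Int × Int × (List (Int × Int)) × (List (Int × Int × Int)) := (1, 2, [(0, 0), (1, 0)], [(1, 2, 5), (2, 2, 7)])
def Spec_place_blanket (start_x : Int) (start_y : Int) (blanket : List (Int × Int)) (joe : List (Int × Int × Int)) (out : Int) : Prop := out = place_blanket_alt start_x start_y blanket joe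
instance (start_x : Int) (start_y : Int) (blanket : List (Int × Int)) (joe : List (Int × Int × Int)) (out : Int) : Decidable (Spec_place_blanket start_x start_y blanket joe out) := by unfold Spec_place_blanket; infer_instance

-- ===== CLAIM (what is proved, stated in full; the proofs are below) =====
def Claim_equal_place_blanket : Prop := ∀ (start_x : Int) (start_y : Int) (blanket : List (Int × Int)) (joe : List (Int × Int × Int)), Dom_place_blanket start_x start_y blanket joe → Pre_place_blanket start_x start_y blanket joe → Spec_place_blanket start_x start_y blanket joe (place_blanket start_x start_y blanket joe)

-- ===== LEMMAS AND PROOFS =====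

-- per-blanket-point contribution in A
def gA (start_x start_y : Int) (joe : List (Int × Int × Int)) (p : Int × Int) : Int :=
  match joe.find? (fun t => t.1 == start_x + p.1 && t.2.1 == start_y + p.2) with
  | some t => t.2.2
  | none => 0

-- per-joe-entry contribution in B (after reducing membership in the shifted set to blanket membership)
def gB (start_x start_y : Int) (blanket : List (Int × Int)) (t : Int × Int × Int) : Int :=
  if (t.1 - start_x, t.2.1 - start_y) ∈ blanket then t.2.2 else 0

theorem foldA_sum (start_x start_y : Int) (joe : List (Int × Int × Int)) :
    ∀ (l : List (Int × Int)) (s : Int),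
      l.foldl (fun s p =>
        match joe.find? (fun t => t.1 == start_x + p.1 && t.2.1 == start_y + p.2) with
        | some t => s + t.2.2
        | none => s) s = s + (l.map (gA start_x start_y joe)).sum := by
  intro l
  induction l with
  | nil => simp
  | cons p rest ih =>
    intro s
    simp only [List.foldl_cons, List.map_cons, List.sum_cons, ih, gA]
    cases joe.find? (fun t => t.1 == start_x + p.1 && t.2.1 == start_y + p.2) with
    | none => simp
    | some t' =>
      simp only []
      ring

-- B's filtered sum over joe equals the sum of per-entry contributions gB
theorem filterB_sum (start_x start_y : Int) (blanket : List (Int × Int)) (joe : List (Int × Int × Int)) :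
    ((joe.filter (fun t => PySem.Set.contains
        (PySem.Set.ofList (blanket.map (fun p => (start_x + p.1, start_y + p.2)))) (t.1, t.2.1))).map
      (fun t => t.2.2)).sum
      = (joe.map (gB start_x start_y blanket)).sum := by
  induction joe with
  | nil => simp
  | cons t rest ih =>
    have hmem : (PySem.Set.contains
        (PySem.Set.ofList (blanket.map (fun p => (start_x + p.1, start_y + p.2)))) (t.1, t.2.1))
        = decide ((t.1 - start_x, t.2.1 - start_y) ∈ blanket) := by
      by_cases h : (t.1 - start_x, t.2.1 - start_y) ∈ blanket
      · rw [decide_eq_true h, PySem.Set.contains_iff, PySem.Set.mem_ofList]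
        exact List.mem_map.mpr ⟨(t.1 - start_x, t.2.1 - start_y), h,
          by simp only [Prod.mk.injEq]; constructor <;> ring⟩
      · rw [decide_eq_false h]
        apply Bool.eq_false_iff.mpr
        intro hc
        rcases List.mem_map.mp ((PySem.Set.mem_ofList _ _).mp
            ((PySem.Set.contains_iff _ _).mp hc)) with ⟨p, hp, he⟩
        apply h
        obtain ⟨px, py⟩ := p
        simp only [Prod.mk.injEq] at he
        have : ((t.1 - start_x, t.2.1 - start_y) : Int × Int) = (px, py) := by
          simp only [Prod.mk.injEq]; omega
        rwa [this]
    rw [List.filter_cons, hmem]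
    by_cases h : (t.1 - start_x, t.2.1 - start_y) ∈ blanket
    · rw [decide_eq_true h, if_pos rfl, List.map_cons, List.sum_cons, ih,
        List.map_cons, List.sum_cons]
      show t.2.2 + _ = gB start_x start_y blanket t + _
      rw [gB, if_pos h]
    · rw [decide_eq_false h, if_neg Bool.false_ne_true, ih, List.map_cons, List.sum_cons]
      show _ = gB start_x start_y blanket t + _
      rw [gB, if_neg h]
      ring

theorem sum_map_add (f g : (Int × Int) → Int) (l : List (Int × Int)) :
    (l.map (fun p => f p + g p)).sum = (l.map f).sum + (l.map g).sum := by
  induction l with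
  | nil => simp
  | cons p rest ih => simp [ih]; ring

theorem sum_if_mem (q : Int × Int) (c : Int) (l : List (Int × Int)) (h : l.Nodup) :
    (l.map (fun p => if p = q then c else 0)).sum = if q ∈ l then c else 0 := by
  induction l with
  | nil => simp
  | cons p rest ih =>
    simp only [List.nodup_cons] at h
    simp only [List.map_cons, List.sum_cons, ih h.2, List.mem_cons]
    by_cases hp : p = q
    · subst hp
      rw [if_pos rfl, if_neg h.1, if_pos (Or.inl rfl)]
      ring
    · rw [if_neg hp]
      by_cases hm : q ∈ rest
      · rw [if_pos hm, if_pos (Or.inr hm)]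
        ring
      · rw [if_neg hm, if_neg (by rintro (h' | h'); exact hp h'.symm; exact hm h')]
        ring

theorem gA_notmem (start_x start_y : Int) (t : Int × Int × Int) (rest : List (Int × Int × Int))
    (h : (t.1, t.2.1) ∉ rest.map (fun t => (t.1, t.2.1))) :
    gA start_x start_y rest (t.1 - start_x, t.2.1 - start_y) = 0 := by
  unfold gA
  have hf : rest.find? (fun t' => t'.1 == start_x + (t.1 - start_x) && t'.2.1 == start_y + (t.2.1 - start_y)) = none := by
    rw [List.find?_eq_none]
    intro x hx
    simp only [Bool.and_eq_true, beq_iff_eq, not_and]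
    intro h1 h2
    have hxt : ((fun t : Int × Int × Int => (t.1, t.2.1)) x) = (t.1, t.2.1) := by
      simp only [Prod.mk.injEq]
      omega
    exact h (hxt ▸ List.mem_map_of_mem hx)
  rw [hf]

theorem gA_cons (start_x start_y : Int) (t : Int × Int × Int) (rest : List (Int × Int × Int)) (p : Int × Int) :
    gA start_x start_y (t :: rest) p
      = if p = (t.1 - start_x, t.2.1 - start_y) then t.2.2 else gA start_x start_y rest p := by
  rcases p with ⟨px, py⟩
  by_cases hp : (px, py) = ((t.1 - start_x, t.2.1 - start_y) : Int × Int)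
  · simp only [Prod.mk.injEq] at hp
    unfold gA
    rw [List.find?_cons_of_pos (by simp only [Bool.and_eq_true, beq_iff_eq]; omega)]
    simp only [Prod.mk.injEq]
    rw [if_pos ⟨hp.1, hp.2⟩]
  · simp only [Prod.mk.injEq, not_and] at hp
    unfold gA
    rw [List.find?_cons_of_neg (by simp only [Bool.and_eq_true, beq_iff_eq, not_and]; intro h1 h2; exact hp (by omega) (by omega))]
    rw [if_neg (by simp only [Prod.mk.injEq, not_and]; intro h1; exact hp h1)]

theorem sums_eq (start_x start_y : Int) (blanket : List (Int × Int)) (hb : blanket.Nodup) :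
    ∀ (joe : List (Int × Int × Int)), (joe.map (fun t => (t.1, t.2.1))).Nodup →
      (blanket.map (gA start_x start_y joe)).sum = (joe.map (gB start_x start_y blanket)).sum := by
  intro joe
  induction joe with
  | nil =>
    simp only [List.map_nil, List.sum_nil]
    have h0 : List.map (gA start_x start_y []) blanket = List.map (fun _ => (0 : Int)) blanket :=
      List.map_congr_left (fun p _ => rfl)
    simp [h0]
  | cons t rest ih =>
    intro hj
    simp only [List.map_cons, List.nodup_cons] at hj ⊢
    have hkey : (t.1, t.2.1) ∉ rest.map (fun t => (t.1, t.2.1)) := hj.1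
    have hmap : blanket.map (gA start_x start_y (t :: rest))
        = blanket.map (fun p => gA start_x start_y rest p
            + (if p = (t.1 - start_x, t.2.1 - start_y) then t.2.2 else 0)) := by
      apply List.map_congr_left
      intro p _
      rw [gA_cons]
      by_cases hp : p = (t.1 - start_x, t.2.1 - start_y)
      · subst hp
        simp [gA_notmem start_x start_y t rest hkey]
      · simp [hp]
    rw [hmap, sum_map_add, sum_if_mem _ _ _ hb, ih hj.2, List.sum_cons, gB]
    ring

-- ===== VERDICT (by name: the statement is the Claim_ definition above) =====
theorem place_blanket_spec : Claim_equal_place_blanket := by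
  intro start_x start_y blanket joe _ hpre
  unfold Spec_place_blanket place_blanket place_blanket_alt
  rw [foldA_sum, filterB_sum, ← sums_eq start_x start_y blanket hpre.1 joe hpre.2]
  ring
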